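-- pv_equiv track=rewrite | github.com/AbstractEndeavors/contract-Deployer | brandNewDeps/contractParse.py | determineSectionMod
-- ===== SOURCE A (Python) =====
-- def isInList(x,ls):
--     newLs = []
--     for i in range(0,len(ls)):
--         n = ls[i]
--         nn = ''
--         for k in range(0,len(n)):
--             nn = nn + n[k]
--         if str(x) == str(nn):
--             newLs.append(n)
--     return len(newLs),newLs
--
-- def determineSectionMod(x,ls,k):
--     n = ''
--     lsNew = []
--     for i in range(0,len(ls)):
--         lsNew.append(k+ls[i])
--     ls = lsNew
--     for i in range(0,len(str(x))):
--         n = n + x[i]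
--         match = isInList(n,ls)
--         if match[0] == 1:
--             return match[1][0]
--         elif match[0] == 0:
--             return None
-- ===== SOURCE B (Python) =====
-- def determineSectionMod(x, ls, k):
--     # One pass over ls tallying, per length, how many k-prefixed elements are
--     # prefixes of x; then a single scan over the lengths decides the answer.
--     m = len(x)
--     cnt = [0] * (m + 1)
--     for e in ls:
--         y = k + e
--         t = len(y)
--         if 1 <= t <= m and x.startswith(y):
--             cnt[t] += 1
--     for t in range(1, m + 1):
--         if cnt[t] == 1:
--             return x[:t]
--         if cnt[t] == 0:
--             return None
--     return None
-- ===== Notes on version B (the rewrite author's own statement) =====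
-- stated objective: faster
-- what changed: Inverts the traversal: instead of growing a prefix of x and rescanning/counting the list at each step, B makes one pass over ls tallying per-length counts of k-prefixed elements that are prefixes of x, then a single integer-array scan over the lengths 1..len(x) picks the answer.
import Mathlib
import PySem

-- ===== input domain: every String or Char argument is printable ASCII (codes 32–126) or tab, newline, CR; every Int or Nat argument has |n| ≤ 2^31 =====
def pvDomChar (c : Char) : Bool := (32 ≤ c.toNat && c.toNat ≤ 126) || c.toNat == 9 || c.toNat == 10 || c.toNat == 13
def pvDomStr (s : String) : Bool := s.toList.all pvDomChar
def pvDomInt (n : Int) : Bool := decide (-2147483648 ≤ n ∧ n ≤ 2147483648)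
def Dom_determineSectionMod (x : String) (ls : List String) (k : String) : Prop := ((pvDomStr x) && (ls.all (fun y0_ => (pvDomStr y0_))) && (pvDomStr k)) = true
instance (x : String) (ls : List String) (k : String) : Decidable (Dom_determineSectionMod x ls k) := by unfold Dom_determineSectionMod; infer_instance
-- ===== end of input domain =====

-- B inverts the traversal: one pass over ls tallies, per length, the k-prefixed elements that
-- are prefixes of x; a single scan of that integer array then picks the answer (faster).

-- ===== PORT A =====
def isInList (x : String) (ls : List String) : Int × List String :=
  let newLs := ls.foldl (fun acc n =>
    let nn := n.toList.foldl (fun s c => s.push c) ""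
    if x == nn then acc ++ [n] else acc) []
  ((newLs.length : Int), newLs)

def dsmLoop (ls : List String) (cs : List Char) (n : String) : Option String :=
  match cs with
  | [] => none
  | c :: rest =>
    let n' := n.push c
    let m := isInList n' ls
    if m.1 == 1 then m.2.head?          -- match[1][0]: nonempty when the count is 1
    else if m.1 == 0 then none
    else dsmLoop ls rest n'

def determineSectionMod (x : String) (ls : List String) (k : String) : Option String :=
  let lsNew := ls.foldl (fun acc e => acc ++ [k ++ e]) []
  dsmLoop lsNew x.toList ""

-- ===== PORT B =====
-- 'for t in range(1, m+1)' with early returns: recursion over the index list [1, …, m]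
def bScan (x : String) (cnt : List Int) : List Nat → Option String
  | [] => none
  | t :: rest =>
    if cnt.getD t 0 == 1 then some (String.ofList (x.toList.take t))   -- x[:t]
    else if cnt.getD t 0 == 0 then none
    else bScan x cnt rest

def determineSectionMod_alt (x : String) (ls : List String) (k : String) : Option String :=
  let m := x.toList.length
  let cnt := ls.foldl (fun (a : List Int) e =>
      let y := k ++ e
      let t := y.toList.length
      if 1 ≤ t ∧ t ≤ m ∧ PySem.Str.startswith x y = true then a.set t (a.getD t 0 + 1) else a)
    (List.replicate (m + 1) 0)
  bScan x cnt (List.range' 1 m)          -- range(1, m+1)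

-- ===== PRECONDITION & SPEC =====
def Spec_determineSectionMod (x : String) (ls : List String) (k : String) (out : Option String) : Prop := out = determineSectionMod_alt x ls k
instance (x : String) (ls : List String) (k : String) (out : Option String) : Decidable (Spec_determineSectionMod x ls k out) := by unfold Spec_determineSectionMod; infer_instance

-- ===== CLAIM (what is proved, stated in full; the proofs are below) =====
def Claim_equal_determineSectionMod : Prop := ∀ (x : String) (ls : List String) (k : String), Dom_determineSectionMod x ls k → Spec_determineSectionMod x ls k (determineSectionMod x ls k)

-- ===== LEMMAS AND PROOFS =====

-- rebuilding a string character by character yields the string itself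
theorem foldl_push_toList (cs : List Char) (s : String) :
    (cs.foldl (fun t c => t.push c) s).toList = s.toList ++ cs := by
  induction cs generalizing s with
  | nil => simp
  | cons c cs ih => simp [List.foldl_cons, ih]

theorem isInList_eq (x : String) (ls : List String) :
    isInList x ls = (((ls.filter (fun e => x == e)).length : Int), ls.filter (fun e => x == e)) := by
  unfold isInList
  have h : ∀ e : String, (e.toList.foldl (fun t c => t.push c) "") = e := by
    intro e
    apply String.ext
    simp [foldl_push_toList]
  simp only [h, PySem.List.foldl_append_if_eq_filter, List.nil_append]

theorem filter_len_count (x : String) (ls : List String) :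
    (ls.filter (fun e => x == e)).length = ls.count x := by
  induction ls with
  | nil => simp
  | cons a t ih =>
      by_cases hx : x = a
      · subst hx; simp [ih]
      · simp [hx, Ne.symm hx, ih]

theorem filter_head_of_len_one (x : String) (ls : List String)
    (h : (ls.filter (fun e => x == e)).length = 1) :
    (ls.filter (fun e => x == e)).head? = some x := by
  rcases List.length_eq_one_iff.mp h with ⟨a, ha⟩
  have ham : a ∈ ls.filter (fun e => x == e) := by simp [ha]
  have hx : x = a := by simpa using (List.mem_filter.mp ham).2
  rw [ha, hx]
  rfl

-- a k-prefixed element counted at length t is exactly the length-t prefix of x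
theorem eq_prefix_iff (x y : String) (t : Nat) (h1 : 1 ≤ t) (hm : t ≤ x.toList.length) :
    (1 ≤ y.toList.length ∧ y.toList.length ≤ x.toList.length ∧
       PySem.Str.startswith x y = true ∧ y.toList.length = t)
      ↔ y = String.ofList (x.toList.take t) := by
  constructor
  · rintro ⟨_, _, hs, hlen⟩
    have hpre : y.toList <+: x.toList := by
      have := (PySem.Str.startswith_eq x y)
      rw [this] at hs
      exact (PySem.Chars.startswith_iff _ _).mp hs
    have : y.toList = x.toList.take t := by
      rw [← hlen]
      exact (List.prefix_iff_eq_take.mp hpre)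
    have h2 : String.ofList y.toList = String.ofList (x.toList.take t) := by rw [this]
    simpa using h2
  · rintro rfl
    have hlen : (String.ofList (x.toList.take t)).toList.length = t := by
      have hx : x.toList.length = x.length := by simp
      simp
      omega
    refine ⟨by omega, by omega, ?_, hlen⟩
    rw [PySem.Str.startswith_eq]
    exact (PySem.Chars.startswith_iff _ _).mpr (by simpa using List.take_prefix t x.toList)

-- the tallying fold computes, at every admissible length t, the multiplicity of x[:t]
theorem cnt_spec (x k : String) (ls : List String) (a : List Int)
    (ha : a.length = x.toList.length + 1) (t : Nat) (h1 : 1 ≤ t) (hm : t ≤ x.toList.length) :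
    (ls.foldl (fun (a : List Int) e =>
        let y := k ++ e
        let ty := y.toList.length
        if 1 ≤ ty ∧ ty ≤ x.toList.length ∧ PySem.Str.startswith x y = true
        then a.set ty (a.getD ty 0 + 1) else a) a).getD t 0
      = a.getD t 0 + (((ls.map (fun e => k ++ e)).count (String.ofList (x.toList.take t)) : Nat) : Int) := by
  induction ls generalizing a with
  | nil => simp
  | cons e rest ih =>
    simp only [List.foldl_cons, List.map_cons]
    set y := k ++ e with hy
    by_cases hc : 1 ≤ y.toList.length ∧ y.toList.length ≤ x.toList.length ∧ PySem.Str.startswith x y = true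
    · rw [if_pos hc]
      have ha' : (a.set y.toList.length (a.getD y.toList.length 0 + 1)).length = x.toList.length + 1 := by
        simp [ha]
      rw [ih _ ha']
      by_cases het : y.toList.length = t
      · -- y is exactly x[:t]
        have hyeq : y = String.ofList (x.toList.take t) :=
          (eq_prefix_iff x y t h1 hm).mp ⟨hc.1, hc.2.1, hc.2.2, het⟩
        have hset : (a.set y.toList.length (a.getD y.toList.length 0 + 1)).getD t 0
            = a.getD t 0 + 1 := by
          subst het
          rw [List.getD_eq_getElem?_getD, List.getElem?_set_self (by omega)]
          simp [List.getD_eq_getElem?_getD]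
        rw [hset, List.count_cons, if_pos (by exact beq_iff_eq.mpr hyeq)]
        push_cast; ring
      · have hyne : y ≠ String.ofList (x.toList.take t) := by
          intro hcon
          exact het ((eq_prefix_iff x y t h1 hm).mpr hcon).2.2.2
        have hset : (a.set y.toList.length (a.getD y.toList.length 0 + 1)).getD t 0 = a.getD t 0 := by
          rw [List.getD_eq_getElem?_getD, List.getElem?_set_ne het, List.getD_eq_getElem?_getD]
        rw [hset, List.count_cons, if_neg (by simpa using hyne)]
        push_cast; ring
    · rw [if_neg hc, ih _ ha]
      have hyne : y ≠ String.ofList (x.toList.take t) := by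
        intro hcon
        have h' := (eq_prefix_iff x y t h1 hm).mpr hcon
        exact hc ⟨h'.1, h'.2.1, h'.2.2.1⟩
      rw [List.count_cons, if_neg (by simpa using hyne)]
      push_cast; ring

-- growing-prefix loop of A = index scan of B, given cnt carries the multiplicities
theorem scan_agree (x : String) (L : List String) (cnt : List Int)
    (hcnt : ∀ t, 1 ≤ t → t ≤ x.toList.length →
        cnt.getD t 0 = ((L.count (String.ofList (x.toList.take t)) : Nat) : Int)) :
    ∀ (d j : Nat), j + d = x.toList.length →
      dsmLoop L (x.toList.drop j) (String.ofList (x.toList.take j)) = bScan x cnt (List.range' (j+1) d) := by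
  intro d
  induction d with
  | zero =>
    intro j hj
    have : x.toList.drop j = [] := List.drop_eq_nil_of_le (by omega)
    simp [this, dsmLoop, bScan]
  | succ d ih =>
    intro j hj
    have hjlt : j < x.toList.length := by omega
    have hdrop : x.toList.drop j = x.toList[j] :: x.toList.drop (j+1) :=
      List.drop_eq_getElem_cons hjlt
    have hpush : (String.ofList (x.toList.take j)).push (x.toList[j]) = String.ofList (x.toList.take (j+1)) := by
      apply String.ext
      rw [String.toList_push, String.toList_ofList, String.toList_ofList,
          List.take_add_one, List.getElem?_eq_getElem hjlt]
      rfl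
    rw [hdrop]
    show dsmLoop L (x.toList[j] :: x.toList.drop (j+1)) (String.ofList (x.toList.take j)) = _
    rw [dsmLoop]
    simp only [hpush, isInList_eq, filter_len_count]
    have hrange : List.range' (j+1) (d+1) = (j+1) :: List.range' (j+2) d := rfl
    rw [hrange, bScan]
    rw [hcnt (j+1) (by omega) (by omega)]
    by_cases h1 : L.count (String.ofList (x.toList.take (j+1))) = 1
    · have hh := filter_head_of_len_one (String.ofList (x.toList.take (j+1))) L
        (by rw [filter_len_count]; exact h1)
      simp [h1, hh]
    · by_cases h0 : L.count (String.ofList (x.toList.take (j+1))) = 0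
      · simp [h0]
      · have e1 : ¬ (((L.count (String.ofList (x.toList.take (j+1))) : Nat) : Int) == 1) = true := by
          simp; omega
        have e0 : ¬ (((L.count (String.ofList (x.toList.take (j+1))) : Nat) : Int) == 0) = true := by
          simp; omega
        simp only [if_neg e1, if_neg e0]
        have := ih (j+1) (by omega)
        simpa using this

-- ===== VERDICT (by name: the statement is the Claim_ definition above) =====
theorem determineSectionMod_spec : Claim_equal_determineSectionMod := by
  intro x ls k _
  unfold Spec_determineSectionMod determineSectionMod determineSectionMod_alt
  simp only [PySem.List.foldl_append_singleton_eq_map, List.nil_append]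
  have hcnt := fun t h1 hm => cnt_spec x k ls (List.replicate (x.toList.length + 1) 0)
    (by simp) t h1 hm
  have hcnt' : ∀ t, 1 ≤ t → t ≤ x.toList.length →
      (ls.foldl (fun (a : List Int) e =>
          let y := k ++ e
          let ty := y.toList.length
          if 1 ≤ ty ∧ ty ≤ x.toList.length ∧ PySem.Str.startswith x y = true
          then a.set ty (a.getD ty 0 + 1) else a) (List.replicate (x.toList.length + 1) 0)).getD t 0
        = (((ls.map (fun e => k ++ e)).count (String.ofList (x.toList.take t)) : Nat) : Int) := by
    intro t h1 hm
    rw [hcnt t h1 hm]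
    simp only [List.getD_eq_getElem?_getD, List.getElem?_replicate]
    split <;> simp
  have := scan_agree x (ls.map (fun e => k ++ e)) _ hcnt' x.toList.length 0 (by omega)
  simpa using this
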